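-- pv_equiv track=rewrite | github.com/Dheeraj0053/Advanced-Python-Practice-Questions | Q3.py | firstLetters
-- ===== SOURCE A (Python) =====
-- def firstLetters(s):
--     result = []
--     new_word = True
--     for char in s:
--         if char == ' ':
--             new_word = True
--         elif new_word:
--             result.append(char)
--             new_word = False
--     return ''.join(result)
-- ===== SOURCE B (Python) =====
-- def firstLetters(s):
--     return ''.join(word[0] for word in s.split(' ') if word)
-- ===== Notes on version B (the rewrite author's own statement) =====
-- stated objective: idiomatic
-- what changed: Replaces the character-by-character state machine with a new_word flag by a split on the space character followed by a filter/map pass taking the first character of each non-empty fragment (C-level str.split instead of a Python-level loop).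
import Mathlib
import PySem

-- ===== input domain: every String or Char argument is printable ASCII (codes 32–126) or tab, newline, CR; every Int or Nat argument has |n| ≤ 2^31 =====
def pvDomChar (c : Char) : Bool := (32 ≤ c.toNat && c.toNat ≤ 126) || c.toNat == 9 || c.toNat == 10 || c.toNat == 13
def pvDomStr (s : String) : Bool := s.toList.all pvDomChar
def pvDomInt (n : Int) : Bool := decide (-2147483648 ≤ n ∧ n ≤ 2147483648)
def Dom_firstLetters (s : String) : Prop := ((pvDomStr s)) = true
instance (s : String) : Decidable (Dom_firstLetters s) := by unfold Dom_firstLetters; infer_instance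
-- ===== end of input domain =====

-- Header: B replaces A's per-character state machine (new_word flag) by splitting on ' '
-- and taking the first character of each non-empty fragment; same result, more idiomatic.


-- ===== PORT A =====
-- the for loop, carrying (result, new_word) exactly as A does
def firstLettersLoop : List Char → List Char → Bool → List Char
  | [], result, _ => result
  | c :: cs, result, new_word =>
    if c = ' ' then firstLettersLoop cs result true
    else if new_word then firstLettersLoop cs (result ++ [c]) false
    else firstLettersLoop cs result new_word

def firstLetters (s : String) : String :=
  String.ofList (firstLettersLoop s.toList [] true)

-- ===== PORT B =====
-- s.split(' ') = List.splitOn ' ' on the char list (empty fragments kept, as in Python);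
-- word[0] with the 'if word' guard = headD on a fragment known non-empty
def firstLetters_alt (s : String) : String :=
  String.ofList (((s.toList.splitOn ' ').filter (fun w => w ≠ [])).map (fun w => w.headD ' '))

-- ===== PRECONDITION & SPEC =====
def Spec_firstLetters (s : String) (out : String) : Prop := out = firstLetters_alt s
instance (s : String) (out : String) : Decidable (Spec_firstLetters s out) := by unfold Spec_firstLetters; infer_instance

-- ===== CLAIM (what is proved, stated in full; the proofs are below) =====
def Claim_equal_firstLetters : Prop := ∀ (s : String), Dom_firstLetters s → Spec_firstLetters s (firstLetters s)

-- ===== LEMMAS AND PROOFS =====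

def pvFirsts (parts : List (List Char)) : List Char :=
  (parts.filter (fun w => w ≠ [])).map (fun w => w.headD ' ')

theorem firstLettersLoop_acc (cs : List Char) :
    ∀ acc nw, firstLettersLoop cs acc nw = acc ++ firstLettersLoop cs [] nw := by
  induction cs with
  | nil => intro acc nw; simp [firstLettersLoop]
  | cons c cs ih =>
    intro acc nw
    by_cases h : c = ' '
    · simp [firstLettersLoop, h, ih acc]
    · by_cases hn : nw
      · simp [firstLettersLoop, h, hn]
        rw [ih (acc ++ [c]), ih [c]]
        simp
      · simp [firstLettersLoop, h, hn, ih acc]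

theorem splitOn_space_ne_nil (cs : List Char) : cs.splitOn ' ' ≠ [] := by
  simp [List.splitOn]
  exact List.splitOnP_ne_nil _ cs

theorem splitOn_cons_space (cs : List Char) :
    (' ' :: cs).splitOn ' ' = [] :: cs.splitOn ' ' := by
  simp [List.splitOn, List.splitOnP_cons]

theorem splitOn_cons_ne {c : Char} (cs : List Char) (h : c ≠ ' ') :
    (c :: cs).splitOn ' ' = (cs.splitOn ' ').modifyHead (c :: ·) := by
  simp [List.splitOn, List.splitOnP_cons, h]

theorem loop_eq_firsts (cs : List Char) :
    firstLettersLoop cs [] true = pvFirsts (cs.splitOn ' ') ∧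
    firstLettersLoop cs [] false = pvFirsts ((cs.splitOn ' ').tail) := by
  induction cs with
  | nil => simp [firstLettersLoop, List.splitOn, List.splitOnP, List.splitOnP.go, pvFirsts]
  | cons c cs ih =>
    obtain ⟨ih1, ih2⟩ := ih
    by_cases h : c = ' '
    · subst h
      constructor <;> simp [firstLettersLoop, splitOn_cons_space, pvFirsts, ih1]
    · obtain ⟨hd, tl, hsplit⟩ := List.exists_cons_of_ne_nil (splitOn_space_ne_nil cs)
      have hcons : (c :: cs).splitOn ' ' = (c :: hd) :: tl := by
        rw [splitOn_cons_ne cs h, hsplit]; rfl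
      constructor
      · have hstep : firstLettersLoop (c :: cs) [] true = c :: firstLettersLoop cs [] false := by
          simp [firstLettersLoop, h, firstLettersLoop_acc cs [c] false]
        rw [hstep, ih2, hcons, hsplit]
        simp [pvFirsts]
      · simp [firstLettersLoop, h, hcons, ih2, hsplit]

-- ===== VERDICT (by name: the statement is the Claim_ definition above) =====
theorem firstLetters_spec : Claim_equal_firstLetters := by
  intro s _
  unfold Spec_firstLetters firstLetters firstLetters_alt
  rw [(loop_eq_firsts s.toList).1]
  rfl
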